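-- pv_equiv track=rewrite | github.com/Julio-Azevedo/ProjetoALP-pytricia | pytricia/verifica.py | verifica_numerologia
-- ===== SOURCE A (Python) =====
-- def verifica_numerologia(nome):
--     tabela = {
--         '1': ['A', 'J', 'S'],
--         '2': ['B', 'K', 'T'],
--         '3': ['C', 'L', 'U'],
--         '4': ['D', 'M', 'V'],
--         '5': ['E', 'N', 'W'],
--         '6': ['F', 'O', 'X'],
--         '7': ['G', 'P', 'Y'],
--         '8': ['H', 'Q', 'Z'],
--         '9': ['I', 'R']
--     }
--
--     nome
--     valor = 0
--     for letra in nome: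
--         for chave, letras in tabela.items():
--             if letra in letras:
--                 valor += int(chave)
--                 break
--         if valor > 36:
--             valor = valor % 36
--     return valor
-- ===== SOURCE B (Python) =====
-- def verifica_numerologia(nome):
--     # Stage 1: frequency table of the name's characters.
--     counts = {}
--     for ch in nome:
--         counts[ch] = counts.get(ch, 0) + 1
--     # Stage 2: aggregate over the alphabet; letter k (A=0..Z=25) is worth k % 9 + 1.
--     total = 0
--     for k in range(26):
--         total += (k % 9 + 1) * counts.get(chr(65 + k), 0)
--     # Stage 3: single closed-form wrap replicating the running conditional mod.
--     return (total - 1) % 36 + 1 if total else 0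
-- ===== Notes on version B (the rewrite author's own statement) =====
-- stated objective: faster
-- what changed: Replaces A's per-character scan over the 9-entry numerology table with its running conditional `valor %= 36` by a staged count-then-aggregate algorithm: build a character frequency dict in one pass, sum over the 26-letter alphabet using the arithmetic value formula (k % 9 + 1) instead of any table, and apply one closed-form modular reduction ((total-1) % 36 + 1, 0 when total is 0); removing the inner table scan and per-character mod is a constant-factor speedup.
import Mathlib
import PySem

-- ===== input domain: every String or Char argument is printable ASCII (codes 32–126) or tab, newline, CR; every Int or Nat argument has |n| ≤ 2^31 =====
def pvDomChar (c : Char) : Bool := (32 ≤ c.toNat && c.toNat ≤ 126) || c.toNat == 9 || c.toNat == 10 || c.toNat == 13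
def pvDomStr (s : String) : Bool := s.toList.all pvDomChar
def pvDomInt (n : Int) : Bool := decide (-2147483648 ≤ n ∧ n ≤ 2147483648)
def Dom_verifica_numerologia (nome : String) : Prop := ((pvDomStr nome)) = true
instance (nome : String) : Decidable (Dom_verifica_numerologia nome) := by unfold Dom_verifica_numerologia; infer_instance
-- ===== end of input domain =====

-- B replaces A's per-character table scan with running conditional mod by a staged
-- count-then-aggregate algorithm: a frequency dict, a sum over the 26-letter alphabet
-- using the arithmetic value (k % 9 + 1), and one closed-form modular reduction
-- (objective: faster by a constant factor — the inner table scan and per-character mod are gone).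

-- ===== PORT A =====
-- Python's table values are lists of 1-character strings compared against the iterated
-- characters of `nome`; they are represented as Char here (exact on 1-character strings).
def tabelaA : List (String × List Char) :=
  [("1", ['A','J','S']), ("2", ['B','K','T']), ("3", ['C','L','U']),
   ("4", ['D','M','V']), ("5", ['E','N','W']), ("6", ['F','O','X']),
   ("7", ['G','P','Y']), ("8", ['H','Q','Z']), ("9", ['I','R'])]

-- the inner `for chave, letras in tabela.items(): … break` loop
def lookupA (letra : Char) : List (String × List Char) → Int → Int
  | [], valor => valor
  | (chave, letras) :: rest, valor =>
    if letras.contains letra then valor + (PySem.Int.ofStr? chave).getD 0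
    else lookupA letra rest valor

def verifica_numerologia (nome : String) : Int :=
  nome.toList.foldl (fun valor letra =>
    let v := lookupA letra tabelaA valor
    if v > 36 then PySem.Int.mod v 36 else v) 0

-- ===== PORT B =====
-- chr(65 + k) is Char.ofNat (65 + k), exact on this range
def verifica_numerologia_alt (nome : String) : Int :=
  let counts : PySem.Dict Char Int :=
    nome.toList.foldl (fun d ch => d.insert ch (d.getD ch 0 + 1)) PySem.Dict.empty
  let total : Int := (PySem.List.pyRange 0 26 1).foldl
    (fun acc k => acc + (PySem.Int.mod k 9 + 1) * counts.getD (Char.ofNat (65 + k.toNat)) 0) 0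
  if total ≠ 0 then PySem.Int.mod (total - 1) 36 + 1 else 0

-- ===== PRECONDITION & SPEC =====
def Spec_verifica_numerologia (nome : String) (out : Int) : Prop := out = verifica_numerologia_alt nome
instance (nome : String) (out : Int) : Decidable (Spec_verifica_numerologia nome out) := by unfold Spec_verifica_numerologia; infer_instance

-- ===== CLAIM =====
def Claim_equal_verifica_numerologia : Prop := ∀ (nome : String), Dom_verifica_numerologia nome → Spec_verifica_numerologia nome (verifica_numerologia nome)

-- ===== LEMMAS AND PROOFS =====

-- proof-side letter→value table (A's table flattened; used only in the proofs)
def pvVals : PySem.Dict Char Int := PySem.Dict.ofList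
  [('A',1),('B',2),('C',3),('D',4),('E',5),('F',6),('G',7),('H',8),('I',9),
   ('J',1),('K',2),('L',3),('M',4),('N',5),('O',6),('P',7),('Q',8),('R',9),
   ('S',1),('T',2),('U',3),('V',4),('W',5),('X',6),('Y',7),('Z',8)]

theorem lookupA_eq (c : Char) (v : Int) :
    lookupA c tabelaA v = v + pvVals.getD c 0 := by
  by_cases h : c ∈ ['A','B','C','D','E','F','G','H','I','J','K','L','M',
                    'N','O','P','Q','R','S','T','U','V','W','X','Y','Z']
  · fin_cases h <;> simp [lookupA, tabelaA] <;> decide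
  · simp only [List.mem_cons, List.not_mem_nil, or_false, not_or] at h
    obtain ⟨h1,h2,h3,h4,h5,h6,h7,h8,h9,h10,h11,h12,h13,h14,h15,h16,h17,h18,h19,h20,h21,h22,h23,h24,h25,h26⟩ := h
    have hmk : pvVals = PySem.Dict.mk
      [('A',1),('B',2),('C',3),('D',4),('E',5),('F',6),('G',7),('H',8),('I',9),
       ('J',1),('K',2),('L',3),('M',4),('N',5),('O',6),('P',7),('Q',8),('R',9),
       ('S',1),('T',2),('U',3),('V',4),('W',5),('X',6),('Y',7),('Z',8)] := by decide
    simp [lookupA, tabelaA, hmk, PySem.Dict.getD, PySem.Dict.get?,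
          h1,h2,h3,h4,h5,h6,h7,h8,h9,h10,h11,h12,h13,h14,h15,h16,h17,h18,h19,h20,h21,h22,h23,h24,h25,h26,
          Ne.symm h1,Ne.symm h2,Ne.symm h3,Ne.symm h4,Ne.symm h5,Ne.symm h6,Ne.symm h7,Ne.symm h8,Ne.symm h9,Ne.symm h10,Ne.symm h11,Ne.symm h12,Ne.symm h13,Ne.symm h14,Ne.symm h15,Ne.symm h16,Ne.symm h17,Ne.symm h18,Ne.symm h19,Ne.symm h20,Ne.symm h21,Ne.symm h22,Ne.symm h23,Ne.symm h24,Ne.symm h25,Ne.symm h26]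

theorem pvVals_bounds (c : Char) : 0 ≤ pvVals.getD c 0 ∧ pvVals.getD c 0 ≤ 9 := by
  by_cases h : c ∈ ['A','B','C','D','E','F','G','H','I','J','K','L','M',
                    'N','O','P','Q','R','S','T','U','V','W','X','Y','Z']
  · fin_cases h <;> decide
  · simp only [List.mem_cons, List.not_mem_nil, or_false, not_or] at h
    obtain ⟨h1,h2,h3,h4,h5,h6,h7,h8,h9,h10,h11,h12,h13,h14,h15,h16,h17,h18,h19,h20,h21,h22,h23,h24,h25,h26⟩ := h
    have hmk : pvVals = PySem.Dict.mk
      [('A',1),('B',2),('C',3),('D',4),('E',5),('F',6),('G',7),('H',8),('I',9),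
       ('J',1),('K',2),('L',3),('M',4),('N',5),('O',6),('P',7),('Q',8),('R',9),
       ('S',1),('T',2),('U',3),('V',4),('W',5),('X',6),('Y',7),('Z',8)] := by decide
    simp [hmk, PySem.Dict.getD, PySem.Dict.get?, Ne.symm h1,Ne.symm h2,Ne.symm h3,Ne.symm h4,Ne.symm h5,Ne.symm h6,Ne.symm h7,Ne.symm h8,Ne.symm h9,Ne.symm h10,Ne.symm h11,Ne.symm h12,Ne.symm h13,Ne.symm h14,Ne.symm h15,Ne.symm h16,Ne.symm h17,Ne.symm h18,Ne.symm h19,Ne.symm h20,Ne.symm h21,Ne.symm h22,Ne.symm h23,Ne.symm h24,Ne.symm h25,Ne.symm h26]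

-- the 26-letter aggregation written over per-character counts
def pvTot (cnt : Char → Int) : Int :=
  (PySem.List.pyRange 0 26 1).foldl
    (fun acc k => acc + (PySem.Int.mod k 9 + 1) * cnt (Char.ofNat (65 + k.toNat))) 0

theorem pvTot_cons (c : Char) (cs : List Char) :
    pvTot (fun ℓ => ((c :: cs).count ℓ : Int))
      = pvTot (fun ℓ => (cs.count ℓ : Int)) + pvVals.getD c 0 := by
  have hr : PySem.List.pyRange 0 26 1
      = [0,1,2,3,4,5,6,7,8,9,10,11,12,13,14,15,16,17,18,19,20,21,22,23,24,25] := by decide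
  have hmk : pvVals = PySem.Dict.mk
      [('A',1),('B',2),('C',3),('D',4),('E',5),('F',6),('G',7),('H',8),('I',9),
       ('J',1),('K',2),('L',3),('M',4),('N',5),('O',6),('P',7),('Q',8),('R',9),
       ('S',1),('T',2),('U',3),('V',4),('W',5),('X',6),('Y',7),('Z',8)] := by decide
  by_cases h : c ∈ ['A','B','C','D','E','F','G','H','I','J','K','L','M',
                    'N','O','P','Q','R','S','T','U','V','W','X','Y','Z']
  · fin_cases h <;>
    · rw [hmk]
      simp [pvTot, hr, List.count_cons, PySem.Dict.getD, PySem.Dict.get?]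
      ring
  · simp only [List.mem_cons, List.not_mem_nil, or_false, not_or] at h
    obtain ⟨h1,h2,h3,h4,h5,h6,h7,h8,h9,h10,h11,h12,h13,h14,h15,h16,h17,h18,h19,h20,h21,h22,h23,h24,h25,h26⟩ := h
    simp [pvTot, hr, List.count_cons, hmk, PySem.Dict.getD, PySem.Dict.get?,
          h1,h2,h3,h4,h5,h6,h7,h8,h9,h10,h11,h12,h13,h14,h15,h16,h17,h18,h19,h20,h21,h22,h23,h24,h25,h26,
          Ne.symm h1,Ne.symm h2,Ne.symm h3,Ne.symm h4,Ne.symm h5,Ne.symm h6,Ne.symm h7,Ne.symm h8,Ne.symm h9,Ne.symm h10,Ne.symm h11,Ne.symm h12,Ne.symm h13,Ne.symm h14,Ne.symm h15,Ne.symm h16,Ne.symm h17,Ne.symm h18,Ne.symm h19,Ne.symm h20,Ne.symm h21,Ne.symm h22,Ne.symm h23,Ne.symm h24,Ne.symm h25,Ne.symm h26]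

-- the per-character sum with a general initial accumulator
theorem sumVals_shift (cs : List Char) (a : Int) :
    cs.foldl (fun acc ch => acc + pvVals.getD ch 0) a
      = a + cs.foldl (fun acc ch => acc + pvVals.getD ch 0) 0 := by
  induction cs generalizing a with
  | nil => simp
  | cons c cs ih => simp only [List.foldl_cons]; rw [ih, ih (0 + _)]; ring

theorem sumVals_nonneg (cs : List Char) :
    0 ≤ cs.foldl (fun acc ch => acc + pvVals.getD ch 0) 0 := by
  induction cs with
  | nil => simp
  | cons c cs ih =>
    rw [List.foldl_cons, sumVals_shift]
    have := (pvVals_bounds c).1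
    omega

-- B's staged total equals the per-character value sum
theorem pvTot_eq_sum (cs : List Char) :
    pvTot (fun ℓ => (cs.count ℓ : Int)) = cs.foldl (fun acc ch => acc + pvVals.getD ch 0) 0 := by
  induction cs with
  | nil => simp [pvTot]
  | cons c cs ih =>
    rw [pvTot_cons, ih, List.foldl_cons, sumVals_shift cs (0 + pvVals.getD c 0)]
    ring

theorem loopA_eq (cs : List Char) : ∀ v : Int, 0 ≤ v → v ≤ 36 →
    cs.foldl (fun valor letra =>
      let v := lookupA letra tabelaA valor
      if v > 36 then PySem.Int.mod v 36 else v) v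
    = (if v + cs.foldl (fun acc ch => acc + pvVals.getD ch 0) 0 = 0 then 0
       else (v + cs.foldl (fun acc ch => acc + pvVals.getD ch 0) 0 - 1) % 36 + 1) := by
  induction cs with
  | nil =>
    intro v h0 h36
    simp only [List.foldl_nil]
    split_ifs <;> omega
  | cons c cs ih =>
    intro v h0 h36
    rw [List.foldl_cons, List.foldl_cons]
    simp only [lookupA_eq, PySem.Int.mod_eq_emod_of_pos (show (0:Int) < 36 by norm_num)] at ih ⊢
    rw [sumVals_shift cs (0 + pvVals.getD c 0)]
    have hb := pvVals_bounds c
    have hs := sumVals_nonneg cs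
    rw [ih _ (by split_ifs <;> omega) (by split_ifs <;> omega)]
    split_ifs <;> omega

-- ===== VERDICT =====
theorem verifica_numerologia_spec : Claim_equal_verifica_numerologia := by
  intro nome _
  unfold Spec_verifica_numerologia verifica_numerologia verifica_numerologia_alt
  have hc : ∀ ℓ : Char,
      (nome.toList.foldl (fun d ch => d.insert ch (d.getD ch 0 + 1)) PySem.Dict.empty).getD ℓ 0
        = (nome.toList.count ℓ : Int) := by
    intro ℓ
    rw [PySem.Dict.getD_foldl_insert_add_one]
    simp [PySem.Dict.getD, PySem.Dict.empty, PySem.Dict.get?]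
  have htot : (PySem.List.pyRange 0 26 1).foldl
      (fun acc k => acc + (PySem.Int.mod k 9 + 1) *
        (nome.toList.foldl (fun d ch => d.insert ch (d.getD ch 0 + 1)) PySem.Dict.empty).getD
          (Char.ofNat (65 + k.toNat)) 0) 0
      = pvTot (fun ℓ => (nome.toList.count ℓ : Int)) := by
    simp only [pvTot, hc]
  rw [loopA_eq nome.toList 0 le_rfl (by norm_num)]
  simp only [htot, pvTot_eq_sum, zero_add,
    PySem.Int.mod_eq_emod_of_pos (show (0:Int) < 36 by norm_num)]
  by_cases h : nome.toList.foldl (fun acc ch => acc + pvVals.getD ch 0) 0 = 0 <;> simp [h]
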